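-- pv_equiv track=rewrite | github.com/jsill/Stanford_CS_336 | cs336_basics/tokenizer.py | getSpecialTokenLocs
-- ===== SOURCE A (Python) =====
-- def getSpecialTokenLocs(sTok,lne):
--     splits=lne.split(sTok)
--     locs=[]
--     sTokLen=len(sTok)
--     idx=0
--     for s in splits:
--         sLen=len(s)
--         locs.append(idx + sLen)
--         idx=idx + sLen + sTokLen
--     return locs
-- ===== SOURCE B (Python) =====
-- def getSpecialTokenLocs(sTok, lne):
--     if not sTok:
--         raise ValueError("empty separator")
--     locs = []
--     pos = 0
--     while True:
--         i = lne.find(sTok, pos)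
--         if i == -1:
--             break
--         locs.append(i)
--         pos = i + len(sTok)
--     locs.append(len(lne))
--     return locs
-- ===== Notes on version B (the rewrite author's own statement) =====
-- stated objective: faster
-- what changed: B scans the line directly with a str.find cursor, recording each separator index plus the final line length, instead of materialising the substring list from lne.split and re-deriving positions from piece lengths.
import Mathlib
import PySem

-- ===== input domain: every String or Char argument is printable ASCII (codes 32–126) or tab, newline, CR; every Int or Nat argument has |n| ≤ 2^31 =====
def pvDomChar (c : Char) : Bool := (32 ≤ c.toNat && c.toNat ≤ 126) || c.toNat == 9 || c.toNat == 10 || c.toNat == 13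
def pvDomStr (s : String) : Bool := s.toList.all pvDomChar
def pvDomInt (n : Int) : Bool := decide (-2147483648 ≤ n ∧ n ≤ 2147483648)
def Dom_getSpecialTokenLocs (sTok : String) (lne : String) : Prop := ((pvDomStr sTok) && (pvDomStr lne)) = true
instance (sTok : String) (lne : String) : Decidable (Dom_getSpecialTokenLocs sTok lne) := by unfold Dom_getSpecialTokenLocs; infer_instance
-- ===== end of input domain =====

-- B replaces split-then-measure by a direct str.find cursor scan (objective: faster by a constant factor, no intermediate substring list).

-- ===== PORT A =====
def getSpecialTokenLocs (sTok : String) (lne : String) : List Int :=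
  match PySem.Str.split? lne sTok with
  | none => []   -- lne.split('') raises ValueError; excluded by Pre_
  | some splits =>
    let sTokLen : Int := PySem.Str.len sTok
    (splits.foldl (fun (p : List Int × Int) s =>
      let sLen : Int := PySem.Str.len s
      (p.1 ++ [p.2 + sLen], p.2 + sLen + sTokLen)) ([], 0)).1

-- ===== PORT B =====
-- the while loop of Source B; pos strictly increases each pass, so lne.length + 1 passes always suffice
def altGo (sTok lne : List Char) (fuel : Nat) (pos : Nat) : List Int :=
  match fuel with
  | 0 => [(lne.length : Int)]
  | fuel + 1 =>
    let i := PySem.Chars.findFrom lne sTok (pos : Int)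
    if i = -1 then [(lne.length : Int)]
    else i :: altGo sTok lne fuel (i.toNat + sTok.length)

def getSpecialTokenLocs_alt (sTok : String) (lne : String) : List Int :=
  if sTok.isEmpty then []   -- Source B raises ValueError here; excluded by Pre_
  else altGo sTok.toList lne.toList (lne.toList.length + 1) 0

-- ===== PRECONDITION & SPEC =====
-- Pre_ excludes only sTok = "", where Python's str.split (in A) and B alike raise ValueError.
def Pre_getSpecialTokenLocs (sTok : String) (lne : String) : Prop := sTok ≠ ""
instance (sTok : String) (lne : String) : Decidable (Pre_getSpecialTokenLocs sTok lne) := by unfold Pre_getSpecialTokenLocs; infer_instance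
def pvWitness_getSpecialTokenLocs : String × String := ("b", "abcbb")

def Spec_getSpecialTokenLocs (sTok : String) (lne : String) (out : List Int) : Prop := out = getSpecialTokenLocs_alt sTok lne
instance (sTok : String) (lne : String) (out : List Int) : Decidable (Spec_getSpecialTokenLocs sTok lne out) := by unfold Spec_getSpecialTokenLocs; infer_instance

-- ===== CLAIM (what is proved, stated in full; the proofs are below) =====
def Claim_equal_getSpecialTokenLocs : Prop := ∀ (sTok : String) (lne : String), Dom_getSpecialTokenLocs sTok lne → Pre_getSpecialTokenLocs sTok lne → Spec_getSpecialTokenLocs sTok lne (getSpecialTokenLocs sTok lne)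

-- ===== LEMMAS AND PROOFS =====

-- clean accumulator-free form of PySem.Chars.splitOn.go
def spB (sep : List Char) : List Char → List Char → List (List Char)
  | [], cur => [cur.reverse]
  | c :: rest, cur =>
    if h : sep ≠ [] ∧ sep.isPrefixOf (c :: rest) then
      cur.reverse :: spB sep (List.drop sep.length (c :: rest)) []
    else
      spB sep rest (c :: cur)
termination_by l _ => l.length
decreasing_by
  · have h1 : 1 ≤ sep.length := List.length_pos_iff.mpr h.1
    simp; omega
  · simp

-- A's loop over the pieces, as a pure recursion
def gA (sTokLen : Int) : List (List Char) → Int → List Int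
  | [], _ => []
  | p :: ps, idx => (idx + (p.length : Int)) :: gA sTokLen ps (idx + p.length + sTokLen)

lemma go_eq_spB (sep : List Char) (hsep : sep ≠ []) :
    ∀ fuel (l cur : List Char) (acc : List (List Char)), l.length < fuel →
      PySem.Chars.splitOn.go sep fuel l cur acc = acc.reverse ++ spB sep l cur := by
  intro fuel
  induction fuel with
  | zero => intro l cur acc h; omega
  | succ f ih =>
    intro l cur acc h
    match l with
    | [] => simp [PySem.Chars.splitOn.go, spB]
    | c :: rest =>
      by_cases hp : sep.isPrefixOf (c :: rest)
      · have h1 : 1 ≤ sep.length := List.length_pos_iff.mpr hsep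
        rw [PySem.Chars.splitOn.go]
        simp only [hp, if_true]
        rw [ih (List.drop sep.length (c :: rest)) [] (cur.reverse :: acc)
            (by simp [List.length_cons] at h ⊢; omega)]
        rw [spB]
        simp [hsep, hp]
      · rw [PySem.Chars.splitOn.go]
        simp only [hp, if_false]
        rw [ih rest (c :: cur) acc (by simp at h ⊢; omega)]
        rw [spB]
        simp [hp]

lemma splitOn_eq_spB (s sep : List Char) (hsep : sep ≠ []) :
    PySem.Chars.splitOn s sep = spB sep s [] := by
  unfold PySem.Chars.splitOn
  rw [go_eq_spB sep hsep (s.length + 1) s [] [] (by omega)]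
  simp

lemma spB_no (sep : List Char) (hsep : sep ≠ []) :
    ∀ (s cur : List Char), ¬ sep <:+: s → spB sep s cur = [cur.reverse ++ s] := by
  intro s
  induction s with
  | nil => intro cur _; simp [spB]
  | cons c rest ih =>
    intro cur hno
    rw [spB]
    have hp : ¬ sep.isPrefixOf (c :: rest) := by
      intro hpre
      exact hno (List.IsPrefix.isInfix (List.isPrefixOf_iff_prefix.mp hpre))
    simp only [hp, and_false, dite_false]
    rw [ih (c :: cur) (fun hin => hno (List.IsInfix.trans hin (List.suffix_cons c rest).isInfix))]
    simp

lemma spB_at (sep : List Char) (hsep : sep ≠ []) :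
    ∀ (s : List Char) (k : Nat) (cur : List Char), sep <+: List.drop k s →
      (∀ i < k, ¬ sep <+: List.drop i s) →
      spB sep s cur = (cur.reverse ++ List.take k s) :: spB sep (List.drop (k + sep.length) s) [] := by
  intro s
  induction s with
  | nil =>
    intro k cur hpre _
    exfalso
    simp at hpre
    exact hsep hpre
  | cons c rest ih =>
    intro k cur hpre hmin
    match k with
    | 0 =>
      simp only [List.drop_zero] at hpre
      have hp : sep.isPrefixOf (c :: rest) := List.isPrefixOf_iff_prefix.mpr hpre
      rw [spB]
      simp [hsep, hp]
    | k + 1 =>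
      have h0 : ¬ sep <+: (c :: rest) := by
        have := hmin 0 (by omega); simpa using this
      have hp : ¬ sep.isPrefixOf (c :: rest) := fun h => h0 (List.isPrefixOf_iff_prefix.mp h)
      rw [spB]
      simp only [hp, and_false, dite_false]
      rw [ih k (c :: cur) (by simpa using hpre)
          (fun i hi => by simpa using hmin (i + 1) (by omega))]
      have hidx : k + 1 + sep.length = (k + sep.length) + 1 := by omega
      rw [hidx]
      simp [List.append_assoc]

lemma infix_length_of_prefix_drop {sep s : List Char} {k : Nat}
    (h : sep <+: List.drop k s) (hk : k ≤ s.length) : k + sep.length ≤ s.length := by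
  have := h.length_le
  simp at this
  omega

-- the heart: the find-cursor loop computes gA over the clean split of the suffix
lemma main_lemma (sep lne : List Char) (hsep : sep ≠ []) :
    ∀ fuel pos, pos ≤ lne.length → lne.length - pos < fuel →
      gA (sep.length : Int) (spB sep (List.drop pos lne) []) (pos : Int)
        = altGo sep lne fuel pos := by
  intro fuel
  induction fuel with
  | zero => intro pos hpos h; omega
  | succ f ih =>
    intro pos hpos h
    have hff : PySem.Chars.findFrom lne sep (pos : Int) none =
        if PySem.Chars.find (List.drop pos lne) sep = -1 then -1
        else (pos : Int) + PySem.Chars.find (List.drop pos lne) sep :=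
      PySem.Chars.findFrom_natCast lne sep pos hpos
    by_cases hf : PySem.Chars.find (List.drop pos lne) sep = -1
    · have hno : ¬ sep <:+: List.drop pos lne := (PySem.Chars.find_eq_neg_one_iff _ _).mp hf
      rw [spB_no sep hsep _ _ hno]
      rw [altGo]
      simp only [hff, hf, if_true, List.reverse_nil, List.nil_append]
      rw [gA, gA]
      congr 1
      have : (List.drop pos lne).length = lne.length - pos := by simp
      rw [this]
      omega
    · have hfn : 0 ≤ PySem.Chars.find (List.drop pos lne) sep := by
        have := PySem.Chars.neg_one_le_find (s := List.drop pos lne) (sub := sep)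
        omega
      obtain ⟨hpre, hmin⟩ := PySem.Chars.find_spec (s := List.drop pos lne) (sub := sep) hfn
      set k : Nat := (PySem.Chars.find (List.drop pos lne) sep).toNat with hk
      have hkle : k ≤ (List.drop pos lne).length := by
        have := PySem.Chars.find_le_length (s := List.drop pos lne) (sub := sep)
        omega
      have hklen : k + sep.length ≤ (List.drop pos lne).length :=
        infix_length_of_prefix_drop hpre hkle
      have hdl : (List.drop pos lne).length = lne.length - pos := by simp
      rw [spB_at sep hsep _ k [] hpre hmin]
      rw [gA]
      rw [altGo]
      simp only [hff, hf, if_false]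
      have hcast : ((pos : Int) + PySem.Chars.find (List.drop pos lne) sep) = ((pos + k : Nat) : Int) := by
        push_cast
        omega
      rw [hcast]
      have hne : ((pos + k : Nat) : Int) ≠ -1 := by omega
      split
      · rename_i hcontra
        exact absurd hcontra hne
      · congr 1
        · simp only [List.reverse_nil, List.nil_append]
          rw [List.length_take]
          push_cast
          omega
        · have htoNat : ((pos + k : Nat) : Int).toNat = pos + k := Int.toNat_natCast _
          rw [htoNat]
          have hdd : List.drop (k + sep.length) (List.drop pos lne)
              = List.drop (pos + k + sep.length) lne := by
            rw [List.drop_drop]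
            congr 1
            omega
          rw [hdd]
          have hih := ih (pos + k + sep.length) (by omega) (by
            have h1 : 1 ≤ sep.length := List.length_pos_iff.mpr hsep
            omega)
          have hlt : (([] : List Char).reverse ++ List.take k (List.drop pos lne)).length = k := by
            simp [List.length_take]
            omega
          rw [← hih, hlt]
          push_cast
          ring

lemma foldA_eq (sTokLen : Int) :
    ∀ (pieces : List (List Char)) (acc : List Int) (idx : Int),
      ((pieces.map String.ofList).foldl (fun (p : List Int × Int) s =>
          (p.1 ++ [p.2 + PySem.Str.len s], p.2 + PySem.Str.len s + sTokLen)) (acc, idx)).1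
        = acc ++ gA sTokLen pieces idx := by
  intro pieces
  induction pieces with
  | nil => intro acc idx; simp [gA]
  | cons p ps ih =>
    intro acc idx
    simp only [List.map_cons, List.foldl_cons]
    rw [ih]
    rw [gA]
    simp [PySem.Str.len]

-- ===== VERDICT (by name: the statement is the Claim_ definition above) =====
theorem getSpecialTokenLocs_spec : Claim_equal_getSpecialTokenLocs := by
  intro sTok lne _ hpre
  unfold Spec_getSpecialTokenLocs
  have hsep : sTok.toList ≠ [] := by
    intro h
    exact hpre (by
      have := congrArg String.ofList h
      simpa using this)
  have hne : sTok.isEmpty = false := by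
    cases h : sTok.isEmpty with
    | false => rfl
    | true => exact absurd (String.isEmpty_iff.mp h) hpre
  unfold getSpecialTokenLocs getSpecialTokenLocs_alt
  rw [hne]
  simp only [Bool.false_eq_true, if_false]
  rw [PySem.Str.split?]
  rw [PySem.Chars.split?]
  have hsepE : sTok.toList.isEmpty = false := by
    simpa [List.isEmpty_iff] using hsep
  rw [hsepE]
  simp only [Bool.false_eq_true, if_false, Option.map_some]
  rw [foldA_eq (PySem.Str.len sTok) (PySem.Chars.splitOn lne.toList sTok.toList) [] 0]
  rw [splitOn_eq_spB lne.toList sTok.toList hsep]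
  have hlen : PySem.Str.len sTok = (sTok.toList.length : Int) := by
    simp [PySem.Str.len, PySem.Chars.len]
  rw [hlen]
  have := main_lemma sTok.toList lne.toList hsep (lne.toList.length + 1) 0 (by omega) (by omega)
  simpa using this
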